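-- pv_equiv track=rewrite | github.com/MavProDev/CrawlSpace | crawlspace/process_tree.py | resolve_tree
-- ===== SOURCE A (Python) =====
-- def resolve_tree(pid: int, tree: dict[int, list[int]]) -> list[int]:
--     """Resolve all descendants of a PID in kill-safe order (deepest first).
--
--     Returns descendants with deepest children first, so a killer iterating
--     this list will terminate leaves before their parents — avoiding orphan
--     re-parenting to init.
--     """
--     from collections import deque
--     depths: dict[int, int] = {}
--     queue = deque([(pid, 0)])
--     visited = {pid}
--     while queue:
--         current, depth = queue.popleft()
--         for child in tree.get(current, []):
--             if child in visited:
--                 continue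
--             visited.add(child)
--             depths[child] = depth + 1
--             queue.append((child, depth + 1))
--     # Sort descendants by depth desc (deepest first)
--     return sorted(depths.keys(), key=lambda p: -depths[p])
-- ===== SOURCE B (Python) =====
-- def resolve_tree(pid: int, tree: dict[int, list[int]]) -> list[int]:
--     """Level-by-level BFS: expand whole frontiers, keep the list of levels,
--     then emit the levels deepest-first — no depth bookkeeping, no sort."""
--     visited = {pid}
--     frontier = [pid]
--     levels: list[list[int]] = []
--     while frontier:
--         nxt: list[int] = []
--         for node in frontier:
--             for child in tree.get(node, []):
--                 if child not in visited:
--                     visited.add(child)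
--                     nxt.append(child)
--         if nxt:
--             levels.append(nxt)
--         frontier = nxt
--     out: list[int] = []
--     for level in reversed(levels):
--         out.extend(level)
--     return out
-- ===== Notes on version B (the rewrite author's own statement) =====
-- stated objective: alternative
-- what changed: B replaces A's node-at-a-time BFS queue with depth tags plus a final sort by a frontier-by-frontier level expansion that keeps the list of levels and emits them deepest-first, so no depths dict and no sort exist.
import Mathlib
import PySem

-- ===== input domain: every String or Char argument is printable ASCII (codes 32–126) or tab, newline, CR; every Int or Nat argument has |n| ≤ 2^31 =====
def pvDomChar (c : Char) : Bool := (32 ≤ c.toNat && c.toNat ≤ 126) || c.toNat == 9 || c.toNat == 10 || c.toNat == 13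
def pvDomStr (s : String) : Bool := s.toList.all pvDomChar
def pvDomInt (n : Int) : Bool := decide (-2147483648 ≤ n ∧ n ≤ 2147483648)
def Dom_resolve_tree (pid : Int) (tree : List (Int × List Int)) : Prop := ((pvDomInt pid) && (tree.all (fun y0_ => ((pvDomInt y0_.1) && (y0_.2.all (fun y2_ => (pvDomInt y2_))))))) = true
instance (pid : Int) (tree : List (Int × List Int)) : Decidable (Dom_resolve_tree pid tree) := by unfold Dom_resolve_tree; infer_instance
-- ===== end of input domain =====

-- B replaces A's node-at-a-time BFS (queue of (node, depth) pairs, depths dict, final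
-- sorted by -depth) by a frontier-by-frontier level expansion that keeps the list of
-- levels and emits them deepest-first — objective: alternative algorithm, no sort.

-- ===== PORT A =====
-- body of A's inner 'for child in tree.get(current, [])' loop; state = (visited, depths, queue tail)
def stepA (depth : Nat) (st : PySem.Set Int × PySem.Dict Int Int × List (Int × Nat)) (child : Int) :
    PySem.Set Int × PySem.Dict Int Int × List (Int × Nat) :=
  if child ∈ st.1 then st
  else (st.1.add child, st.2.1.insert child ((depth : Int) + 1), st.2.2 ++ [(child, depth + 1)])

-- A's 'while queue' loop; fuel = 1 + total number of child entries bounds the number of pops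
-- (each push after the initial one visits a fresh node), so the loop is run to completion
def bfsA (tree : PySem.Dict Int (List Int)) :
    Nat → List (Int × Nat) → PySem.Set Int → PySem.Dict Int Int → PySem.Dict Int Int
  | 0, _, _, depths => depths
  | _ + 1, [], _, depths => depths
  | fuel + 1, (current, depth) :: rest, visited, depths =>
    let st := (tree.getD current []).foldl (stepA depth) (visited, depths, rest)
    bfsA tree fuel st.2.2 st.1 st.2.1

def resolve_tree (pid : Int) (tree : List (Int × List Int)) : List Int :=
  let depths := bfsA (PySem.Dict.mk tree) (1 + (tree.map (fun p => p.2.length)).sum)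
    [(pid, 0)] (PySem.Set.ofList [pid]) PySem.Dict.empty
  PySem.List.sorted depths.keys (fun p => -(depths.getD p 0))

-- ===== PORT B =====
-- body of B's 'if child not in visited' step; state = (visited, nxt)
def nextStep (st : PySem.Set Int × List Int) (child : Int) : PySem.Set Int × List Int :=
  if child ∈ st.1 then st else (st.1.add child, st.2 ++ [child])

-- B's 'while frontier' loop, one recursion per level; fuel = 1 + total child entries
-- bounds the number of levels (each further level contains at least one fresh node)
def bfsLevels (tree : PySem.Dict Int (List Int)) :
    Nat → List Int → PySem.Set Int → List (List Int) → List (List Int)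
  | 0, _, _, levels => levels
  | _ + 1, [], _, levels => levels
  | fuel + 1, node :: frontier, visited, levels =>
    let st := (node :: frontier).foldl (fun s nd => (tree.getD nd []).foldl nextStep s) (visited, [])
    bfsLevels tree fuel st.2 st.1 (if st.2.isEmpty then levels else levels ++ [st.2])

def resolve_tree_alt (pid : Int) (tree : List (Int × List Int)) : List Int :=
  let levels := bfsLevels (PySem.Dict.mk tree) (1 + (tree.map (fun p => p.2.length)).sum)
    [pid] (PySem.Set.ofList [pid]) []
  levels.reverse.foldl (fun out level => out ++ level) []

-- ===== PRECONDITION & SPEC =====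
def Spec_resolve_tree (pid : Int) (tree : List (Int × List Int)) (out : List Int) : Prop := out = resolve_tree_alt pid tree
instance (pid : Int) (tree : List (Int × List Int)) (out : List Int) : Decidable (Spec_resolve_tree pid tree out) := by unfold Spec_resolve_tree; infer_instance

-- ===== CLAIM (what is proved, stated in full; the proofs are below) =====
def Claim_equal_resolve_tree : Prop := ∀ (pid : Int) (tree : List (Int × List Int)), Dom_resolve_tree pid tree → Spec_resolve_tree pid tree (resolve_tree pid tree)

-- ===== LEMMAS AND PROOFS =====

-- depths-dict items ↔ levels: withDepth bs d lists every node of level i paired with depth d+i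
def withDepth : List (List Int) → Int → List (Int × Int)
  | [], _ => []
  | g :: bs, d => g.map (fun x => (x, d)) ++ withDepth bs (d + 1)

lemma withDepth_append (bs : List (List Int)) (g : List Int) (d : Int) :
    withDepth (bs ++ [g]) d = withDepth bs d ++ g.map (fun x => (x, d + bs.length)) := by
  induction bs generalizing d with
  | nil => simp [withDepth]
  | cons h t ih => simp [withDepth, ih, List.append_assoc]; ring_nf; simp

lemma withDepth_map_fst (bs : List (List Int)) (d : Int) :
    (withDepth bs d).map Prod.fst = bs.flatten := by
  induction bs generalizing d with
  | nil => rfl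
  | cons h t ih =>
    simp [withDepth, ih]
    have : (Prod.fst ∘ fun x : Int => (x, d)) = id := rfl
    rw [this, List.map_id]

lemma withDepth_mem (bs : List (List Int)) :
    ∀ (d : Int) (i : Nat) (x : Int) (hi : i < bs.length), x ∈ bs[i] → (x, d + i) ∈ withDepth bs d := by
  induction bs with
  | nil => intro _ i _ hi; simp at hi
  | cons h t ih =>
    intro d i x hi hx
    cases i with
    | zero => simp [withDepth]; left; simpa using hx
    | succ j =>
      simp [withDepth]
      right
      have := ih (d + 1) j x (by simpa using hi) (by simpa using hx)
      convert this using 2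
      ring

lemma bfsA_nil (tree : PySem.Dict Int (List Int)) (fa : Nat) (v : PySem.Set Int)
    (dep : PySem.Dict Int Int) : bfsA tree fa [] v dep = dep := by
  cases fa <;> rfl

lemma bfsLevels_nil (tree : PySem.Dict Int (List Int)) (fb : Nat) (v : PySem.Set Int)
    (levels : List (List Int)) : bfsLevels tree fb [] v levels = levels := by
  cases fb <;> rfl

-- all child occurrences of the raw association list
def allKids (tree : List (Int × List Int)) : List Int := (tree.map Prod.snd).flatten

-- number of not-yet-visited child occurrences: the fuel potential
def Svis (tree : List (Int × List Int)) (v : PySem.Set Int) : Nat :=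
  ((allKids tree).filter (fun c => !(PySem.Set.contains v c))).length

lemma getD_mk_sub (tree : List (Int × List Int)) (node c : Int)
    (h : c ∈ (PySem.Dict.mk tree).getD node []) : c ∈ allKids tree := by
  induction tree with
  | nil =>
    rw [PySem.Dict.getD_eq_get?_getD] at h
    rw [show (PySem.Dict.mk ([] : List (Int × List Int))) = PySem.Dict.empty from rfl,
      PySem.Dict.get?_empty] at h
    simp at h
  | cons p rest ih =>
    obtain ⟨k, l⟩ := p
    rw [PySem.Dict.getD_eq_get?_getD, PySem.Dict.get?_mk_cons] at h
    simp only [allKids, List.map_cons, List.flatten_cons, List.mem_append]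
    by_cases hk : (k == node) = true
    · rw [if_pos hk] at h
      exact Or.inl (by simpa using h)
    · rw [if_neg hk] at h
      rw [← PySem.Dict.getD_eq_get?_getD] at h
      exact Or.inr (ih h)

lemma S_drop (tree : List (Int × List Int)) (v v' : PySem.Set Int) (news : List Int)
    (hnd : news.Nodup) (hfresh : ∀ c ∈ news, c ∉ v) (hkids : ∀ c ∈ news, c ∈ allKids tree)
    (hmem : ∀ x, x ∈ v' ↔ x ∈ v ∨ x ∈ news) :
    Svis tree v' + news.length ≤ Svis tree v := by
  have hsplit : (allKids tree).filter (fun c => !(PySem.Set.contains v' c))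
      = ((allKids tree).filter (fun c => !(PySem.Set.contains v c))).filter
          (fun c => !(decide (c ∈ news))) := by
    rw [List.filter_filter]
    apply List.filter_congr
    intro c _
    by_cases hv' : c ∈ v'
    · rcases (hmem c).mp hv' with hm | hm <;> simp [hv', hm]
    · have hcv1 : c ∉ v := fun hm => hv' ((hmem c).mpr (Or.inl hm))
      have hcv2 : c ∉ news := fun hm => hv' ((hmem c).mpr (Or.inr hm))
      simp [hv', hcv1, hcv2]
  have hlen := List.length_eq_length_filter_add
    (l := (allKids tree).filter (fun c => !(PySem.Set.contains v c)))
    (fun c => decide (c ∈ news))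
  have hsub : news.length ≤ ((((allKids tree).filter (fun c => !(PySem.Set.contains v c))).filter
      (fun c => decide (c ∈ news)))).length := by
    apply List.Subperm.length_le
    apply hnd.subperm
    intro c hc
    rw [List.mem_filter, List.mem_filter]
    exact ⟨⟨hkids c hc, by simp [hfresh c hc]⟩, by simpa using hc⟩
  unfold Svis
  rw [hsplit]
  have : (((allKids tree).filter (fun c => !(PySem.Set.contains v c))).filter
      (fun c => !(decide (c ∈ news)))).length
      + (((allKids tree).filter (fun c => !(PySem.Set.contains v c))).filter
      (fun c => decide (c ∈ news))).length
      = ((allKids tree).filter (fun c => !(PySem.Set.contains v c))).length := by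
    omega
  omega

-- one node of the frontier: A's child fold against B's child fold
lemma child_rel (d : Nat) (cs : List Int) :
    ∀ (v : PySem.Set Int) (dep : PySem.Dict Int Int) (q : List (Int × Nat)) (nx : List Int),
    (∀ k ∈ dep.keys, k ∈ v) →
    ∃ news : List Int,
      (cs.foldl nextStep (v, nx)).2 = nx ++ news ∧
      (cs.foldl (stepA d) (v, dep, q)).1 = (cs.foldl nextStep (v, nx)).1 ∧
      (cs.foldl (stepA d) (v, dep, q)).2.1.items = dep.items ++ news.map (fun c => (c, (d : Int) + 1)) ∧
      (cs.foldl (stepA d) (v, dep, q)).2.1.keys = dep.keys ++ news ∧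
      (cs.foldl (stepA d) (v, dep, q)).2.2 = q ++ news.map (fun c => (c, d + 1)) ∧
      news.Nodup ∧ (∀ c ∈ news, c ∉ v ∧ c ∈ cs) ∧
      (∀ x, x ∈ (cs.foldl nextStep (v, nx)).1 ↔ x ∈ v ∨ x ∈ news) := by
  induction cs with
  | nil =>
    intro v dep q nx _
    exact ⟨[], by simp, rfl, by simp, by simp, by simp, by simp, by simp, by simp⟩
  | cons c cs ih =>
    intro v dep q nx hkv
    simp only [List.foldl_cons]
    by_cases hc : c ∈ v
    · have ha : stepA d (v, dep, q) c = (v, dep, q) := by simp [stepA, hc]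
      have hb : nextStep (v, nx) c = (v, nx) := by simp [nextStep, hc]
      rw [ha, hb]
      obtain ⟨news, h1, h2, h3, h4, h5, h6, h7, h8⟩ := ih v dep q nx hkv
      exact ⟨news, h1, h2, h3, h4, h5, h6, fun x hx => ⟨(h7 x hx).1, by simp [(h7 x hx).2]⟩, h8⟩
    · have hck : c ∉ dep.keys := fun hk => hc (hkv c hk)
      have hcontains : dep.contains c = false := by
        rcases Bool.eq_false_or_eq_true (dep.contains c) with ht | hf
        · exact absurd ((PySem.Dict.contains_iff_mem_keys dep c).mp ht) hck
        · exact hf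
      have ha : stepA d (v, dep, q) c =
          (v.add c, dep.insert c ((d : Int) + 1), q ++ [(c, d + 1)]) := by
        simp [stepA, hc]
      have hb : nextStep (v, nx) c = (v.add c, nx ++ [c]) := by simp [nextStep, hc]
      rw [ha, hb]
      have hkv' : ∀ k ∈ (dep.insert c ((d : Int) + 1)).keys, k ∈ v.add c := by
        intro k hk
        rw [PySem.Dict.keys_insert_of_not_contains dep _ hcontains] at hk
        rw [PySem.Set.mem_add]
        rcases List.mem_append.mp hk with hk | hk
        · exact Or.inl (hkv k hk)
        · exact Or.inr (by simpa using hk)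
      obtain ⟨news, h1, h2, h3, h4, h5, h6, h7, h8⟩ :=
        ih (v.add c) (dep.insert c ((d : Int) + 1)) (q ++ [(c, d + 1)]) (nx ++ [c]) hkv'
      refine ⟨c :: news, ?_, h2, ?_, ?_, ?_, ?_, ?_, ?_⟩
      · rw [h1]; simp
      · rw [h3, PySem.Dict.items_insert_of_not_contains dep _ hcontains]; simp
      · rw [h4, PySem.Dict.keys_insert_of_not_contains dep _ hcontains]; simp
      · rw [h5]; simp
      · refine List.nodup_cons.mpr ⟨fun hm => ?_, h6⟩
        exact (h7 c hm).1 (by rw [PySem.Set.mem_add]; exact Or.inr rfl)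
      · intro c' hc'
        rcases List.mem_cons.mp hc' with rfl | hc'
        · exact ⟨hc, by simp⟩
        · refine ⟨fun hm => (h7 c' hc').1 (by rw [PySem.Set.mem_add]; exact Or.inl hm), ?_⟩
          simp [(h7 c' hc').2]
      · intro x
        rw [h8 x, PySem.Set.mem_add]
        constructor
        · rintro ((hx | rfl) | hx)
          · exact Or.inl hx
          · exact Or.inr (by simp)
          · exact Or.inr (by simp [hx])
        · rintro (hx | hx)
          · exact Or.inl (Or.inl hx)
          · rcases List.mem_cons.mp hx with rfl | hx
            · exact Or.inl (Or.inr rfl)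
            · exact Or.inr hx

-- a whole level: frontier.length pops of bfsA against one frontier fold of B
lemma level_rel (tree : PySem.Dict Int (List Int)) (d : Nat) (frontier : List Int) :
    ∀ (g : Nat) (v : PySem.Set Int) (dep : PySem.Dict Int Int) (pend : List Int),
    (∀ k ∈ dep.keys, k ∈ v) →
    ∃ (news : List Int) (dep' : PySem.Dict Int Int),
      (frontier.foldl (fun s nd => (tree.getD nd []).foldl nextStep s) (v, pend)).2 = pend ++ news ∧
      bfsA tree (g + frontier.length) (frontier.map (fun x => (x, d)) ++ pend.map (fun x => (x, d + 1))) v dep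
        = bfsA tree g (((pend ++ news).map (fun x => (x, d + 1))))
            (frontier.foldl (fun s nd => (tree.getD nd []).foldl nextStep s) (v, pend)).1 dep' ∧
      dep'.items = dep.items ++ news.map (fun c => (c, (d : Int) + 1)) ∧
      dep'.keys = dep.keys ++ news ∧
      news.Nodup ∧ (∀ c ∈ news, c ∉ v ∧ ∃ nd, c ∈ tree.getD nd []) ∧
      (∀ x, x ∈ (frontier.foldl (fun s nd => (tree.getD nd []).foldl nextStep s) (v, pend)).1 ↔ x ∈ v ∨ x ∈ news) := by
  induction frontier with
  | nil =>
    intro g v dep pend _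
    refine ⟨[], dep, by simp, ?_, by simp, by simp, by simp, by simp, by simp⟩
    simp
  | cons x fr ih =>
    intro g v dep pend hkv
    obtain ⟨news₁, hc1, hc2, hc3, hc4, hc5, hc6, hc7, hc8⟩ :=
      child_rel d (tree.getD x []) v dep (fr.map (fun y => (y, d)) ++ pend.map (fun y => (y, d + 1))) pend hkv
    have hkv₁ : ∀ k ∈ ((tree.getD x []).foldl (stepA d)
        (v, dep, fr.map (fun y => (y, d)) ++ pend.map (fun y => (y, d + 1)))).2.1.keys,
        k ∈ ((tree.getD x []).foldl nextStep (v, pend)).1 := by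
      intro k hk
      rw [hc4] at hk
      rw [hc8 k]
      rcases List.mem_append.mp hk with hk | hk
      · exact Or.inl (hkv k hk)
      · exact Or.inr hk
    obtain ⟨news₂, dep₂, h1, h2, h3, h4, h5, h6, h7⟩ :=
      ih g ((tree.getD x []).foldl nextStep (v, pend)).1
        ((tree.getD x []).foldl (stepA d)
          (v, dep, fr.map (fun y => (y, d)) ++ pend.map (fun y => (y, d + 1)))).2.1
        (pend ++ news₁) hkv₁
    refine ⟨news₁ ++ news₂, dep₂, ?_, ?_, ?_, ?_, ?_, ?_, ?_⟩
    · have hfold : (fr.foldl (fun s nd => (tree.getD nd []).foldl nextStep s)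
          ((tree.getD x []).foldl nextStep (v, pend))).2 = (pend ++ news₁) ++ news₂ := by
        have heq : ((tree.getD x []).foldl nextStep (v, pend))
            = (((tree.getD x []).foldl nextStep (v, pend)).1, pend ++ news₁) := by
          rw [← hc1]
        rw [heq]
        exact h1
      simpa [List.append_assoc] using hfold
    · show bfsA tree (g + (fr.length + 1)) _ v dep = _
      have hfuel : g + (fr.length + 1) = (g + fr.length) + 1 := by omega
      rw [hfuel]
      simp only [List.map_cons, List.cons_append, bfsA]
      rw [hc5, hc2]
      have hq : (fr.map (fun y => (y, d)) ++ pend.map (fun y => (y, d + 1)))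
          ++ news₁.map (fun y => (y, d + 1))
          = fr.map (fun y => (y, d)) ++ (pend ++ news₁).map (fun y => (y, d + 1)) := by
        simp [List.append_assoc]
      rw [hq]
      have heq : ((tree.getD x []).foldl nextStep (v, pend))
          = (((tree.getD x []).foldl nextStep (v, pend)).1, pend ++ news₁) := by
        rw [← hc1]
      rw [h2, ← List.append_assoc]
      congr 1
      simp only [List.foldl_cons]
      rw [← heq]
    · rw [h3, hc3]; simp [List.append_assoc]
    · rw [h4, hc4]; simp [List.append_assoc]
    · rw [List.nodup_append]
      refine ⟨hc6, h5, ?_⟩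
      rintro a ha b hb rfl
      exact (h6 a hb).1 ((hc8 a).mpr (Or.inr ha))
    · intro c hcm
      rcases List.mem_append.mp hcm with hcm | hcm
      · exact ⟨(hc7 c hcm).1, x, (hc7 c hcm).2⟩
      · obtain ⟨hnotin, nd, hnd2⟩ := h6 c hcm
        exact ⟨fun hm => hnotin ((hc8 c).mpr (Or.inl hm)), nd, hnd2⟩
    · intro y
      have hfold : (fr.foldl (fun s nd => (tree.getD nd []).foldl nextStep s)
          ((tree.getD x []).foldl nextStep (v, pend))).1
          = ((x :: fr).foldl (fun s nd => (tree.getD nd []).foldl nextStep s) (v, pend)).1 := by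
        simp
      rw [← hfold]
      have heq : ((tree.getD x []).foldl nextStep (v, pend))
          = (((tree.getD x []).foldl nextStep (v, pend)).1, pend ++ news₁) := by
        rw [← hc1]
      rw [heq] at h7 ⊢
      rw [h7 y, hc8 y]
      simp [List.mem_append, or_assoc]

-- the two loops in lockstep: fuel 1 + Svis suffices on both sides
lemma lockstep (tree : List (Int × List Int)) :
    ∀ (fb fa : Nat) (frontier : List Int) (v : PySem.Set Int) (dep : PySem.Dict Int Int)
      (levels : List (List Int)),
    dep.items = withDepth levels 1 → dep.keys.Nodup → (∀ k ∈ dep.keys, k ∈ v) →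
    frontier.length + Svis tree v ≤ fa → 1 + Svis tree v ≤ fb →
    (bfsA (PySem.Dict.mk tree) fa (frontier.map (fun x => (x, levels.length))) v dep).items
      = withDepth (bfsLevels (PySem.Dict.mk tree) fb frontier v levels) 1 ∧
    (bfsA (PySem.Dict.mk tree) fa (frontier.map (fun x => (x, levels.length))) v dep).keys.Nodup := by
  intro fb
  induction fb with
  | zero =>
    intro fa frontier v dep levels _ _ _ _ hfb
    exact absurd hfb (by omega)
  | succ fb ih =>
    intro fa frontier v dep levels hitems hnd hkv hfa hfb
    cases frontier with
    | nil =>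
      rw [List.map_nil, bfsA_nil, bfsLevels_nil]
      exact ⟨hitems, hnd⟩
    | cons x fr =>
      obtain ⟨news, dep', hl1, hl2, hl3, hl4, hl5, hl6, hl7⟩ :=
        level_rel (PySem.Dict.mk tree) levels.length (x :: fr) (fa - (x :: fr).length) v dep [] hkv
      simp only [List.map_nil, List.append_nil, List.nil_append] at hl1 hl2
      have hfa' : fa - (x :: fr).length + (x :: fr).length = fa := by
        simp only [List.length_cons] at hfa ⊢
        omega
      rw [hfa'] at hl2
      have hkids : ∀ c ∈ news, c ∈ allKids tree := by
        intro c hc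
        obtain ⟨nd, hnd2⟩ := (hl6 c hc).2
        exact getD_mk_sub tree nd c hnd2
      have hS := S_drop tree v _ news hl5 (fun c hc => (hl6 c hc).1) hkids hl7
      simp only [bfsLevels]
      rw [hl2, hl1]
      by_cases hnews : news = []
      · subst hnews
        simp only [List.append_nil] at hl3 hl4
        simp only [List.map_nil, List.isEmpty_nil, if_pos]
        rw [bfsA_nil, bfsLevels_nil]
        refine ⟨?_, ?_⟩
        · rw [hl3, hitems]
          simp
        · rw [hl4]
          exact hnd
      · have hpos : 0 < news.length := List.length_pos_iff.mpr hnews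
        have hisE : news.isEmpty = false := by
          cases news with
          | nil => exact absurd rfl hnews
          | cons a l => rfl
        rw [hisE]
        simp only [Bool.false_eq_true, if_false]
        have hitems' : dep'.items = withDepth (levels ++ [news]) 1 := by
          rw [hl3, hitems, withDepth_append]
          congr 1
          apply List.map_congr_left
          intro c _
          simp [Int.add_comm]
        have hnd' : dep'.keys.Nodup := by
          rw [hl4, List.nodup_append]
          refine ⟨hnd, hl5, ?_⟩
          rintro a ha b hb rfl
          exact (hl6 a hb).1 (hkv a ha)
        have hkv' : ∀ k ∈ dep'.keys, k ∈ (((x :: fr).foldl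
            (fun s nd => ((PySem.Dict.mk tree).getD nd []).foldl nextStep s) (v, []))).1 := by
          intro k hk
          rw [hl4] at hk
          rw [hl7 k]
          rcases List.mem_append.mp hk with hk | hk
          · exact Or.inl (hkv k hk)
          · exact Or.inr hk
        have hfaN : news.length + Svis tree ((((x :: fr).foldl
            (fun s nd => ((PySem.Dict.mk tree).getD nd []).foldl nextStep s) (v, []))).1)
            ≤ fa - (x :: fr).length := by
          omega
        have hfbN : 1 + Svis tree ((((x :: fr).foldl
            (fun s nd => ((PySem.Dict.mk tree).getD nd []).foldl nextStep s) (v, []))).1) ≤ fb := by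
          omega
        have := ih (fa - (x :: fr).length) news _ dep' (levels ++ [news]) hitems' hnd' hkv' hfaN hfbN
        simpa using this

-- stable sort of a flatten of key-constant groups with strictly decreasing group keys
lemma insertBy_append_tail (before : Int → Int → Bool) (x : Int) (tail : List Int)
    (h : ∀ t ∈ tail, before x t = true) :
    ∀ s : List Int, PySem.List.insertBy before x (s ++ tail) = PySem.List.insertBy before x s ++ tail := by
  intro s
  induction s with
  | nil =>
    cases tail with
    | nil => simp
    | cons t ts => simp [PySem.List.insertBy, h t (by simp)]
  | cons y s ih =>
    simp only [List.cons_append, PySem.List.insertBy]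
    split_ifs with hb
    · simp
    · simp [ih]

lemma foldl_insertBy_block (before : Int → Int → Bool) :
    ∀ (cs acc : List Int),
    (∀ x ∈ cs, ∀ y ∈ cs, before x y = false) → (∀ x ∈ cs, ∀ y ∈ acc, before x y = false) →
    cs.foldl (fun a x => PySem.List.insertBy before x a) acc = acc ++ cs := by
  intro cs
  induction cs with
  | nil => intro acc _ _; simp
  | cons c cs ih =>
    intro acc hxx hacc
    simp only [List.foldl_cons]
    rw [PySem.List.insertBy_of_forall_not_before before c acc (hacc c (by simp))]
    rw [ih (acc ++ [c])
      (fun x hx y hy => hxx x (by simp [hx]) y (by simp [hy]))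
      (fun x hx y hy => by
        rcases List.mem_append.mp hy with hy | hy
        · exact hacc x (by simp [hx]) y hy
        · simp only [List.mem_singleton] at hy
          rw [hy]; exact hxx x (by simp [hx]) c (by simp))]
    simp

lemma foldl_insertBy_tail (before : Int → Int → Bool) (tail : List Int) :
    ∀ (xs acc : List Int), (∀ x ∈ xs, ∀ t ∈ tail, before x t = true) →
    xs.foldl (fun a x => PySem.List.insertBy before x a) (acc ++ tail) =
      xs.foldl (fun a x => PySem.List.insertBy before x a) acc ++ tail := by
  intro xs
  induction xs with
  | nil => intro acc _; simp
  | cons x xs ih =>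
    intro acc h
    simp only [List.foldl_cons]
    rw [insertBy_append_tail before x tail (h x (by simp)) acc]
    exact ih _ (fun z hz t ht => h z (by simp [hz]) t ht)

lemma sorted_grouped (key : Int → Int) :
    ∀ bs : List (List Int),
    (∀ g ∈ bs, ∀ x ∈ g, ∀ y ∈ g, key x = key y) →
    bs.Pairwise (fun g g' => ∀ x ∈ g, ∀ y ∈ g', key y < key x) →
    PySem.List.sorted bs.flatten key = bs.reverse.flatten := by
  intro bs
  induction bs with
  | nil => intro _ _; simp [PySem.List.sorted_eq_foldl_insertBy]
  | cons g bs ih =>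
    intro hc hd
    rw [List.pairwise_cons] at hd
    rw [PySem.List.sorted_eq_foldl_insertBy]
    simp only [List.flatten_cons, List.foldl_append]
    rw [foldl_insertBy_block _ g []
      (fun x hx y hy => by
        simp only [decide_eq_false_iff_not, not_lt]
        exact le_of_eq (hc g (by simp) y hy x hx))
      (by simp)]
    simp only [List.nil_append]
    have hlt : ∀ x ∈ bs.flatten, ∀ t ∈ g, (decide (key x < key t)) = true := by
      intro x hx t ht
      rcases List.mem_flatten.mp hx with ⟨g', hg', hxg'⟩
      simp only [decide_eq_true_eq]
      exact hd.1 g' hg' t ht x hxg'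
    calc bs.flatten.foldl (fun acc x => PySem.List.insertBy (fun a b => decide (key a < key b)) x acc) g
        = bs.flatten.foldl (fun acc x => PySem.List.insertBy (fun a b => decide (key a < key b)) x acc) ([] ++ g) := by simp
      _ = bs.flatten.foldl (fun acc x => PySem.List.insertBy (fun a b => decide (key a < key b)) x acc) [] ++ g :=
          foldl_insertBy_tail _ g bs.flatten [] hlt
      _ = PySem.List.sorted bs.flatten key ++ g := by rw [PySem.List.sorted_eq_foldl_insertBy]
      _ = bs.reverse.flatten ++ g := by rw [ih (fun g' hg' => hc g' (by simp [hg'])) hd.2]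
      _ = ((g :: bs).reverse).flatten := by simp

lemma final_rel (dep : PySem.Dict Int Int) (bs : List (List Int))
    (h : dep.items = withDepth bs 1) (hnd : dep.keys.Nodup) :
    PySem.List.sorted dep.keys (fun p => -(dep.getD p 0)) = bs.reverse.flatten := by
  have hkeys : dep.keys = bs.flatten := by
    simp only [PySem.Dict.keys, h]
    exact withDepth_map_fst bs 1
  have hval : ∀ (i : Nat) (hi : i < bs.length), ∀ x ∈ bs[i], dep.getD x 0 = 1 + (i : Int) := by
    intro i hi x hx
    exact PySem.Dict.getD_of_mem_items dep (h ▸ withDepth_mem bs 1 i x hi hx) hnd 0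
  rw [hkeys]
  apply sorted_grouped
  · intro g hg x hx y hy
    rcases List.mem_iff_getElem.mp hg with ⟨i, hi, hgi⟩
    subst hgi
    simp only [hval i hi x hx, hval i hi y hy]
  · rw [List.pairwise_iff_getElem]
    intro i j hi hj hij x hx y hy
    simp only [hval i hi x hx, hval j hj y hy]
    have : (i : Int) < (j : Int) := by exact_mod_cast hij
    omega

-- ===== VERDICT (by name: the statement is the Claim_ definition above) =====
theorem resolve_tree_spec : Claim_equal_resolve_tree := by
  intro pid tree _
  unfold Spec_resolve_tree resolve_tree resolve_tree_alt
  have hS : Svis tree (PySem.Set.ofList [pid]) ≤ (tree.map (fun p => p.2.length)).sum := by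
    have h1 : Svis tree (PySem.Set.ofList [pid]) ≤ (allKids tree).length :=
      List.length_filter_le _ _
    have h2 : (allKids tree).length = (tree.map (fun p => p.2.length)).sum := by
      simp only [allKids, List.length_flatten, List.map_map]
      rfl
    omega
  have h := lockstep tree (1 + (tree.map (fun p => p.2.length)).sum)
    (1 + (tree.map (fun p => p.2.length)).sum) [pid] (PySem.Set.ofList [pid]) PySem.Dict.empty []
    (by rfl) (by simp [PySem.Dict.keys_empty]) (by simp [PySem.Dict.keys_empty])
    (by simpa using by omega) (by omega)
  simp only [List.map_cons, List.map_nil, List.length_nil] at h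
  rw [PySem.List.foldl_append_eq_flatten]
  exact final_rel _ _ h.1 h.2
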